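-- pv_equiv track=rewrite | github.com/pypi-data/pypi-mirror-205 | packages/tonkin/tonkin-0.0.10.tar.gz/tonkin-0.0.10/src/tonkin/listops.py | getSubListIndices
-- ===== SOURCE A (Python) =====
-- from typing import List, Any, Iterator
--
-- def shiftListLeft(input: List[Any], shift: int) -> List[Any]:
-- 	# Bring large numbers down to smaller equivalents
-- 	# and handle negatives for shifts right
-- 	shift = shift % len(input)
--
-- 	for i in range(0, shift):
-- 		input.append(input.pop(0))
-- 	return input
--
-- def getSubListIndices(source: List[Any], target: List[Any]) -> List[int]:
-- 	output = []
--
-- 	# TODO: Ensure that the buffer items don't appear in split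
-- 	buffer = [None] * len(target)
--
-- 	for j, i in enumerate(source):
-- 		buffer = shiftListLeft(buffer, 1)
-- 		buffer[-1] = i
--
-- 		if buffer == target:
-- 			output.append(j)
--
-- 	return output
-- ===== SOURCE B (Python) =====
-- def getSubListIndices(source, target):
-- 	m = len(target)
-- 	output = []
-- 	for start in range(len(source) - m + 1):
-- 		if source[start:start + m] == target:
-- 			output.append(start + m - 1)
-- 	return output
-- ===== Notes on version B (the rewrite author's own statement) =====
-- stated objective: faster
-- what changed: B drops A's stateful simulation (a None-padded ring buffer rotated via a pop/append helper at every element, compared against target at each end position) and instead scans start offsets directly, comparing source[start:start+m] to target with one slice comparison and no mutable state, removing the per-element buffer rotation.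
-- outside the precondition, e.g. on getSubListIndices([], []): A returns [], B returns [-1]
import Mathlib
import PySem

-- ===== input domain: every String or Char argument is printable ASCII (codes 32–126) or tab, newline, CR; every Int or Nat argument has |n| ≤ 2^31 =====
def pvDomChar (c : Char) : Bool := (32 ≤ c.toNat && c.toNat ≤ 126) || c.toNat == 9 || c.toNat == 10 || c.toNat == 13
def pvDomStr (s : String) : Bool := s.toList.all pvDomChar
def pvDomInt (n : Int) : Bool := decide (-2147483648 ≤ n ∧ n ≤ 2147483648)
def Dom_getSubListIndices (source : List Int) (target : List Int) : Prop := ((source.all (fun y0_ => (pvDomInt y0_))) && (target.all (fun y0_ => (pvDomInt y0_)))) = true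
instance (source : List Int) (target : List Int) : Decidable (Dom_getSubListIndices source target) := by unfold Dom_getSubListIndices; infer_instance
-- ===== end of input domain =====

-- B replaces A's stateful rotating buffer (with None padding and a rotate helper) by a stateless
-- scan over start offsets comparing slices directly; measured faster (no per-element rotation).

-- ===== PORT A =====
-- helper shiftListLeft, exactly A's code (buffer elements are Option Int: Python's None ↦ none)
def shiftListLeft (input : List (Option Int)) (shift : Int) : List (Option Int) :=
  let shift := PySem.Int.mod shift (PySem.List.len input)   -- shift % len(input); len = 0 is excluded by Pre_
  (PySem.List.pyRange 0 shift 1).foldl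
    (fun acc _ =>
      match PySem.List.pop? acc 0 with   -- input.pop(0); acc nonempty whenever the range is
      | some (x, rest) => rest ++ [x]    -- input.append(...)
      | none => acc)
    input

-- the body of A's for-loop, named so the lemmas below can speak about it
def stepA (tgt : List (Option Int)) (st : List (Option Int) × List Int) (ji : Int × Int) :
    List (Option Int) × List Int :=
  let buf := shiftListLeft st.1 1
  let buf := PySem.List.pySetD buf (-1) (some ji.2)          -- buffer[-1] = i
  (buf, if buf = tgt then st.2 ++ [ji.1] else st.2)

def getSubListIndices (source : List Int) (target : List Int) : List Int :=
  ((PySem.List.enumerate source).foldl (stepA (target.map some))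
    (List.replicate target.length none, [])).2               -- buffer = [None] * len(target); output = []

-- ===== PORT B =====
def getSubListIndices_alt (source : List Int) (target : List Int) : List Int :=
  let m : Int := PySem.List.len target
  (PySem.List.pyRange 0 (PySem.List.len source - m + 1) 1).foldl
    (fun out start =>
      if PySem.List.slice source (some start) (some (start + m)) = target then
        out ++ [start + m - 1]
      else out)
    []

-- ===== PRECONDITION & SPEC =====
-- Pre_ excludes the empty target: there A raises ZeroDivisionError (shift % len(buffer) with len 0) as soon as
-- source is nonempty, and only for source = [] accidentally returns []; B's slice scan reports end index -1 there.
def Pre_getSubListIndices (source : List Int) (target : List Int) : Prop := target ≠ []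
instance (source : List Int) (target : List Int) : Decidable (Pre_getSubListIndices source target) := by unfold Pre_getSubListIndices; infer_instance
def pvWitness_getSubListIndices : List Int × List Int := ([1, 2, 1, 2, 2], [1, 2])

def Spec_getSubListIndices (source : List Int) (target : List Int) (out : List Int) : Prop := out = getSubListIndices_alt source target
instance (source : List Int) (target : List Int) (out : List Int) : Decidable (Spec_getSubListIndices source target out) := by unfold Spec_getSubListIndices; infer_instance

-- ===== CLAIM (what is proved, stated in full; the proofs are below) =====
def Claim_equal_getSubListIndices : Prop := ∀ (source : List Int) (target : List Int), Dom_getSubListIndices source target → Pre_getSubListIndices source target → Spec_getSubListIndices source target (getSubListIndices source target)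

-- ===== LEMMAS AND PROOFS =====

-- the padded buffer after the elements of q have been fed in (m = len target)
def padBuf (m : Nat) (q : List Int) : List (Option Int) :=
  (List.replicate m none ++ q.map some).drop q.length

-- the match condition at end index j of list f, target t
def condEnd (f t : List Int) (j : Nat) : Bool :=
  decide (t.length ≤ j + 1 ∧ ((f.take (j + 1)).drop (j + 1 - t.length)) = t)

lemma padBuf_length (m : Nat) (q : List Int) : (padBuf m q).length = m := by
  simp [padBuf]

lemma padBuf_nonempty (m : Nat) (hm : 0 < m) (q : List Int) : padBuf m q ≠ [] := by
  have h := padBuf_length m q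
  intro hnil
  rw [hnil] at h
  simp at h
  omega

lemma pySetD_neg_one_eq {α : Type} (xs : List α) (h : xs ≠ []) (v : α) :
    PySem.List.pySetD xs (-1) v = xs.dropLast ++ [v] := by
  have hl : 0 < xs.length := List.length_pos_iff.mpr h
  simp [PySem.List.pySetD, PySem.List.pySet?, PySem.List.pyIdx?]
  rw [if_pos (by omega)]
  conv_lhs => rw [← List.dropLast_append_getLast h]
  rw [List.set_append]
  simp

lemma shift_set (buf : List (Option Int)) (hb : buf ≠ []) (x : Int) :
    PySem.List.pySetD (shiftListLeft buf 1) (-1) (some x) = buf.tail ++ [some x] := by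
  cases buf with
  | nil => exact absurd rfl hb
  | cons b bs =>
    cases bs with
    | nil =>
      have h1 : shiftListLeft [b] 1 = [b] := by
        simp [shiftListLeft, PySem.Int.mod, PySem.List.len, Int.fmod]
      rw [h1, pySetD_neg_one_eq _ (by simp)]
      simp
    | cons c cs =>
      have h1 : shiftListLeft (b :: c :: cs) 1 = (c :: cs) ++ [b] := by
        have hpos : (0 : Int) < PySem.List.len (b :: c :: cs) := by
          simp only [PySem.List.len_eq, List.length_cons]
          push_cast
          omega
        have hlen : PySem.Int.mod 1 (PySem.List.len (b :: c :: cs)) = 1 := by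
          rw [PySem.Int.mod_eq_emod_of_pos hpos]
          refine Int.emod_eq_of_lt (by norm_num) ?_
          simp only [PySem.List.len_eq, List.length_cons]
          push_cast
          omega
        simp only [shiftListLeft, hlen]
        have h2 : PySem.List.pyRange 0 1 1 = [0] := by
          have h3 := PySem.List.pyRange_one_singleton (a := (0 : Int))
          simpa using h3
        rw [h2]
        simp [PySem.List.pop?_zero_cons]
      rw [h1, pySetD_neg_one_eq _ (by simp)]
      rw [List.dropLast_concat]
      rfl

lemma stepA_buf_out (t : List Int) (buf : List (Option Int))
    (hb : buf ≠ []) (out : List Int) (j x : Int) :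
    stepA (t.map some) (buf, out) (j, x) =
      (buf.tail ++ [some x],
       if buf.tail ++ [some x] = t.map some then out ++ [j] else out) := by
  simp only [stepA, shift_set buf hb x]

lemma padBuf_step (m : Nat) (hm : 0 < m) (q : List Int) (x : Int) :
    (padBuf m q).tail ++ [some x] = padBuf m (q ++ [x]) := by
  unfold padBuf
  rw [List.tail_drop,
    show ((q ++ [x]).map some) = q.map some ++ [some x] from by simp,
    show (q ++ [x]).length = q.length + 1 from by simp,
    ← List.append_assoc]
  have hle : q.length + 1 ≤ (List.replicate m (none : Option Int) ++ q.map some).length := by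
    simp
    omega
  rw [List.drop_append_of_le_length hle]

lemma map_some_inj (a b : List Int) : a.map some = b.map some ↔ a = b := by
  constructor
  · intro h
    exact List.map_injective_iff.mpr (Option.some_injective _) h
  · intro h; rw [h]

lemma padBuf_drop (m : Nat) (q : List Int) :
    padBuf m q = List.replicate (m - q.length) none ++ (q.drop (q.length - m)).map some := by
  unfold padBuf
  rw [List.drop_append, List.drop_replicate, List.map_drop]
  simp

lemma padBuf_eq_iff (t : List Int) (ht : t ≠ []) (q : List Int) :
    (padBuf t.length q = t.map some) ↔
      (t.length ≤ q.length ∧ q.drop (q.length - t.length) = t) := by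
  rw [padBuf_drop]
  rcases Nat.lt_or_ge q.length t.length with hlt | hge
  · constructor
    · intro h
      exfalso
      obtain ⟨j, hj⟩ : ∃ j, t.length - q.length = j + 1 :=
        ⟨t.length - q.length - 1, by omega⟩
      rw [hj, List.replicate_succ] at h
      cases t with
      | nil => exact ht rfl
      | cons y ys => simp at h
    · intro h
      exact absurd h.1 (by omega)
  · rw [show t.length - q.length = 0 from by omega, List.replicate_zero, List.nil_append,
      map_some_inj]
    constructor
    · intro h; exact ⟨hge, h⟩
    · intro h; exact h.2

lemma foldA_inv (t : List Int) (ht : t ≠ []) (f : List Int) :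
    ∀ (rest p out : List Int), f = p ++ rest →
      (PySem.List.enumerate rest ((p.length : Int))).foldl (stepA (t.map some))
          (padBuf t.length p, out)
        = (padBuf t.length f,
           out ++ ((List.range' p.length rest.length).filter (condEnd f t)).map
             (fun (j : Nat) => (j : Int))) := by
  have hm : 0 < t.length := List.length_pos_iff.mpr ht
  intro rest
  induction rest with
  | nil =>
    intro p out hf
    simp [PySem.List.enumerate_nil, hf]
  | cons x rest' ih =>
    intro p out hf
    rw [PySem.List.enumerate_cons, List.foldl_cons]
    rw [stepA_buf_out t _ (padBuf_nonempty _ hm p) out _ x]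
    rw [padBuf_step _ hm p x]
    have hcond : (padBuf t.length (p ++ [x]) = t.map some) ↔ condEnd f t p.length = true := by
      rw [padBuf_eq_iff t ht]
      have htake : f.take (p.length + 1) = p ++ [x] := by
        rw [hf, show p ++ x :: rest' = (p ++ [x]) ++ rest' from by simp,
          List.take_append_of_le_length (by simp)]
        simp
      simp only [condEnd, htake, decide_eq_true_eq, List.length_append,
        List.length_cons, List.length_nil, Nat.zero_add]
    have hstart : (p.length : Int) + 1 = (((p ++ [x]).length : Nat) : Int) := by
      simp
    rw [hstart, ih (p ++ [x]) _ (by simp [hf])]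
    simp only [Prod.mk.injEq, List.length_append, List.length_cons, List.length_nil,
      Nat.zero_add, List.range'_succ]
    refine ⟨trivial, ?_⟩
    rw [List.filter_cons]
    by_cases hc : condEnd f t p.length = true
    · rw [if_pos (hcond.mpr hc), if_pos hc]
      simp
    · rw [if_neg (fun h => hc (hcond.mp h)), if_neg (by simp [hc])]

lemma A_char (s t : List Int) (ht : t ≠ []) :
    getSubListIndices s t =
      ((List.range s.length).filter (condEnd s t)).map (fun (j : Nat) => (j : Int)) := by
  unfold getSubListIndices
  have h0 : List.replicate t.length (none : Option Int) = padBuf t.length [] := by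
    simp [padBuf]
  have h1 := foldA_inv t ht s s [] [] rfl
  simp only [List.length_nil, Nat.cast_zero, List.nil_append] at h1
  rw [h0]
  rw [show (0 : Int) = ((0 : Nat) : Int) from rfl] at h1 ⊢
  rw [h1]
  simp [List.range_eq_range']

lemma B_char (s t : List Int) :
    getSubListIndices_alt s t =
      ((List.range (s.length + 1 - t.length)).filter
          (fun (k : Nat) => decide ((s.drop k).take t.length = t))).map
        (fun (k : Nat) => ((k : Int) + t.length - 1)) := by
  unfold getSubListIndices_alt
  simp only [PySem.List.len_eq]
  by_cases h : t.length ≤ s.length + 1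
  · have hb : ((s.length : Int) - t.length + 1) = ((s.length + 1 - t.length : Nat) : Int) := by
      omega
    rw [hb, PySem.List.pyRange_zero_natCast, List.foldl_map]
    have hfun : (fun (out : List Int) (k : Nat) =>
        if PySem.List.slice s (some (k : Int)) (some ((k : Int) + (t.length : Int))) = t
        then out ++ [(k : Int) + (t.length : Int) - 1] else out)
      = (fun out k =>
        if (fun (k : Nat) => decide ((s.drop k).take t.length = t)) k = true
        then out ++ [(fun (k : Nat) => ((k : Int) + t.length - 1)) k] else out) := by
      funext out k
      rw [PySem.List.slice_natCast_add]
      simp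
    rw [hfun, PySem.List.foldl_append_if]
    rw [List.nil_append]
  · rw [PySem.List.pyRange_one_eq_nil (by omega),
      show s.length + 1 - t.length = 0 from by omega]
    simp

lemma condEnd_shift (s t : List Int) (hm : 0 < t.length) (k : Nat) :
    condEnd s t (t.length - 1 + k) = decide ((s.drop k).take t.length = t) := by
  simp only [condEnd]
  rw [show t.length - 1 + k + 1 = t.length + k from by omega,
    show t.length + k - t.length = k from by omega,
    List.drop_take,
    show t.length + k - k = t.length from by omega]
  simp [show t.length ≤ t.length + k from by omega]

lemma ranges_eq (s t : List Int) (ht : t ≠ []) :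
    ((List.range s.length).filter (condEnd s t)).map (fun (j : Nat) => (j : Int))
      = ((List.range (s.length + 1 - t.length)).filter
            (fun (k : Nat) => decide ((s.drop k).take t.length = t))).map
          (fun (k : Nat) => ((k : Int) + t.length - 1)) := by
  have hm : 0 < t.length := List.length_pos_iff.mpr ht
  by_cases h : t.length ≤ s.length + 1
  · have hsplit : List.range s.length =
        List.range (t.length - 1) ++
          (List.range (s.length + 1 - t.length)).map (fun k => t.length - 1 + k) := by
      have hn : s.length = (t.length - 1) + (s.length + 1 - t.length) := by omega
      conv_lhs => rw [hn]
      exact List.range_add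
    rw [hsplit, List.filter_append, List.map_append]
    have hnil : (List.range (t.length - 1)).filter (condEnd s t) = [] := by
      rw [List.filter_eq_nil_iff]
      intro j hj
      simp only [List.mem_range] at hj
      simp only [condEnd, decide_eq_true_eq]
      exact fun hand => absurd hand.1 (by omega)
    rw [hnil, List.map_nil, List.nil_append, List.filter_map, List.map_map]
    have hpred : ((condEnd s t) ∘ (fun k => t.length - 1 + k))
        = (fun (k : Nat) => decide ((s.drop k).take t.length = t)) := by
      funext k
      exact condEnd_shift s t hm k
    rw [hpred]
    refine List.map_congr_left ?_
    intro k _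
    simp only [Function.comp]
    omega
  · have hL : (List.range s.length).filter (condEnd s t) = [] := by
      rw [List.filter_eq_nil_iff]
      intro j hj
      simp only [List.mem_range] at hj
      simp only [condEnd, decide_eq_true_eq]
      exact fun hand => absurd hand.1 (by omega)
    rw [hL, show s.length + 1 - t.length = 0 from by omega]
    simp

-- ===== VERDICT (by name: the statement is the Claim_ definition above) =====
theorem getSubListIndices_spec : Claim_equal_getSubListIndices := by
  intro source target _ hpre
  unfold Spec_getSubListIndices
  rw [A_char source target hpre, B_char source target, ranges_eq source target hpre]
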